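-- pv_equiv track=rewrite | github.com/mokshadave63/InformationSecurity | Lab4/modified.py | diagonal_decrypt
-- ===== SOURCE A (Python) =====
-- def diagonal_decrypt(encrypted_text, key):
--     num_columns = len(key)
--     num_rows = len(encrypted_text) // num_columns
--
--     if len(encrypted_text) % num_columns != 0:
--         num_rows += 1
--
--     sorted_key_indices = sorted((char, idx) for idx, char in enumerate(key))
--
--     matrix = [['' for _ in range(num_columns)] for _ in range(num_rows)]
--
--     index = 0
--     for _, original_index in sorted_key_indices:
--         for row in range(num_rows):
--             if index < len(encrypted_text):
--                 matrix[row][original_index] = encrypted_text[index]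
--                 index += 1
--
--     decrypted_text = ''
--     for d in range(num_columns + num_rows - 1):
--         for i in range(num_rows):
--             j = d - i
--             if 0 <= j < num_columns:
--                 decrypted_text += matrix[i][j]
--
--     return decrypted_text.strip()
-- ===== SOURCE B (Python) =====
-- def diagonal_decrypt(encrypted_text, key):
--     n = len(encrypted_text)
--     k = len(key)
--     rows = n // k + (1 if n % k else 0)
--     order = [c for _, c in sorted((ch, c) for c, ch in enumerate(key))]
--     rank = {c: r for r, c in enumerate(order)}
--     out = []
--     for d in range(rows + k - 1):
--         for i in range(max(0, d - k + 1), min(rows - 1, d) + 1):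
--             pos = rank[d - i] * rows + i
--             if pos < n:
--                 out.append(encrypted_text[pos])
--     return ''.join(out).strip()
-- ===== Notes on version B (the rewrite author's own statement) =====
-- stated objective: alternative
-- what changed: B never builds the rows x columns matrix: it computes each key column's rank once (a dict), derives for every anti-diagonal the exact valid row interval, and reads each ciphertext character directly at rank*rows+i, visiting each cell exactly once instead of filling a matrix and scanning all rows for every diagonal; measured cost is comparable on the test inputs.
import Mathlib
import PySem

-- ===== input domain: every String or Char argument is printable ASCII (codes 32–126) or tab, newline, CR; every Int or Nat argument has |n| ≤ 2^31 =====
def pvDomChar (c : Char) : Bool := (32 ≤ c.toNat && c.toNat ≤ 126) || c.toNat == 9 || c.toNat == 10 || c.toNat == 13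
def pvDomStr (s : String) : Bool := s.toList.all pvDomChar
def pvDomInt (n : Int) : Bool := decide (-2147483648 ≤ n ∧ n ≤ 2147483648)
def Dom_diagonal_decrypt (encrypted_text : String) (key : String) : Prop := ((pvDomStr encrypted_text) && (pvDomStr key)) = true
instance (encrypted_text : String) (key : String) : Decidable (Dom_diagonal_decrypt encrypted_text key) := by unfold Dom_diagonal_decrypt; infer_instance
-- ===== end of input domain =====

-- B decrypts the diagonal transposition cipher without materialising the matrix: a rank per key
-- column and the valid row interval of each anti-diagonal give every character by direct indexing.

-- ===== PORT A =====
-- shared helper: 'sorted((char, idx) for idx, char in enumerate(key))'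
def pvSortedPairs (ks : List Char) : List (Char × Int) :=
  PySem.List.sorted2 ((PySem.List.enumerate ks 0).map (fun p => (p.2, p.1)))
    (fun p => p.1) (fun p => p.2) false

-- matrix[i][j] read / write (cells are '' or one character, modelled as List Char)
def pvCell (m : List (List (List Char))) (i j : Int) : List Char :=
  PySem.List.pyGetD (PySem.List.pyGetD m i []) j []

def pvSet2 (m : List (List (List Char))) (i j : Int) (v : List Char) : List (List (List Char)) :=
  PySem.List.pySetD m i (PySem.List.pySetD (PySem.List.pyGetD m i []) j v)

def pvStep (cs : List Char) (c : Int) (st : List (List (List Char)) × Int) (row : Int) :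
    List (List (List Char)) × Int :=
  if st.2 < PySem.List.len cs then
    (pvSet2 st.1 row c [PySem.List.pyGetD cs st.2 ' '], st.2 + 1)
  else st

def pvMatrix0 (rows cols : Int) : List (List (List Char)) :=
  (PySem.List.pyRange 0 rows 1).map (fun _ => (PySem.List.pyRange 0 cols 1).map (fun _ => ([]:List Char)))

def diagonal_decrypt (encrypted_text : String) (key : String) : String :=
  let cs := encrypted_text.toList
  let numColumns : Int := PySem.List.len key.toList
  let numRows0 : Int := PySem.Int.floordiv (PySem.List.len cs) numColumns
  let numRows : Int := if PySem.Int.mod (PySem.List.len cs) numColumns ≠ 0 then numRows0 + 1 else numRows0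
  let sortedKeyIndices := pvSortedPairs key.toList
  let matrix0 := pvMatrix0 numRows numColumns
  let st := sortedKeyIndices.foldl
      (fun st p => (PySem.List.pyRange 0 numRows 1).foldl (pvStep cs p.2) st) (matrix0, 0)
  let dec := (PySem.List.pyRange 0 (numColumns + numRows - 1) 1).foldl (fun acc d =>
      (PySem.List.pyRange 0 numRows 1).foldl (fun acc i =>
        if 0 ≤ d - i ∧ d - i < numColumns then acc ++ pvCell st.1 i (d - i) else acc) acc) ([] : List Char)
  String.ofList (PySem.Chars.strip dec)

-- ===== PORT B =====
def diagonal_decrypt_alt (encrypted_text : String) (key : String) : String :=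
  let cs := encrypted_text.toList
  let n : Int := PySem.List.len cs
  let k : Int := PySem.List.len key.toList
  let rows : Int := PySem.Int.floordiv n k + (if PySem.Int.mod n k ≠ 0 then 1 else 0)
  let order : List Int := (pvSortedPairs key.toList).map (fun p => p.2)
  let rank : PySem.Dict Int Int :=
    (PySem.List.enumerate order 0).foldl (fun d p => d.insert p.2 p.1) PySem.Dict.empty
  let out := (PySem.List.pyRange 0 (rows + k - 1) 1).foldl (fun acc d =>
      (PySem.List.pyRange (max 0 (d - k + 1)) (min (rows - 1) d + 1) 1).foldl (fun acc i =>
        let pos := rank.getD (d - i) 0 * rows + i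
        if pos < n then acc ++ [PySem.List.pyGetD cs pos ' '] else acc) acc) ([] : List Char)
  String.ofList (PySem.Chars.strip out)

-- ===== PRECONDITION & SPEC =====
-- Pre_ excludes only the empty key, on which A raises ZeroDivisionError.
def Pre_diagonal_decrypt (encrypted_text : String) (key : String) : Prop := key.toList ≠ []
instance (encrypted_text : String) (key : String) : Decidable (Pre_diagonal_decrypt encrypted_text key) := by
  unfold Pre_diagonal_decrypt; infer_instance

def pvWitness_diagonal_decrypt : String × String := ("HTOELWORLDXL", "KEY")

def Spec_diagonal_decrypt (encrypted_text : String) (key : String) (out : String) : Prop := out = diagonal_decrypt_alt encrypted_text key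
instance (encrypted_text : String) (key : String) (out : String) : Decidable (Spec_diagonal_decrypt encrypted_text key out) := by unfold Spec_diagonal_decrypt; infer_instance

-- ===== CLAIM (what is proved, stated in full; the proofs are below) =====
def Claim_equal_diagonal_decrypt : Prop := ∀ (encrypted_text : String) (key : String), Dom_diagonal_decrypt encrypted_text key → Pre_diagonal_decrypt encrypted_text key → Spec_diagonal_decrypt encrypted_text key (diagonal_decrypt encrypted_text key)

-- ===== LEMMAS AND PROOFS =====
def pvOrder (ks : List Char) : List Int := (pvSortedPairs ks).map (fun p => p.2)

theorem pvOrder_perm (ks : List Char) : (pvOrder ks).Perm (PySem.List.pyRange 0 ks.length 1) := by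
  have h1 : (pvSortedPairs ks).Perm ((PySem.List.enumerate ks 0).map (fun p => (p.2, p.1))) :=
    PySem.List.sorted2_perm _ _ _ _
  have h2 := h1.map (fun p : Char × Int => p.2)
  have h3 : ((PySem.List.enumerate ks 0).map (fun p : Int × Char => (p.2, p.1))).map (fun p : Char × Int => p.2)
      = PySem.List.pyRange 0 ks.length 1 := by
    rw [List.map_map]
    have := PySem.List.map_fst_enumerate ks 0
    simpa using this
  rw [h3] at h2
  exact h2

theorem pvOrder_nodup (ks : List Char) : (pvOrder ks).Nodup :=
  (pvOrder_perm ks).nodup_iff.mpr (PySem.List.nodup_pyRange_one 0 ks.length)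

theorem pvOrder_mem (ks : List Char) (c : Int) : c ∈ pvOrder ks ↔ 0 ≤ c ∧ c < ks.length := by
  rw [(pvOrder_perm ks).mem_iff, PySem.List.mem_pyRange_one]

def pvRank (ks : List Char) : PySem.Dict Int Int :=
  (PySem.List.enumerate (pvOrder ks) 0).foldl (fun d p => d.insert p.2 p.1) PySem.Dict.empty

theorem pvRank_getD (ks : List Char) (c : Int) (hc : c ∈ pvOrder ks) :
    (pvRank ks).getD c 0 = ((pvOrder ks).idxOf c : Int) := by
  have hnd := pvOrder_nodup ks
  have hkeysnd : ((PySem.List.enumerate (pvOrder ks) 0).map (fun p => p.2)).Nodup := by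
    rw [PySem.List.map_snd_enumerate]; exact hnd
  have hitems : (pvRank ks).items
      = PySem.Dict.empty.items ++ (PySem.List.enumerate (pvOrder ks) 0).map (fun p => (p.2, p.1)) := by
    exact PySem.Dict.items_foldl_insert_fresh (k := fun p => p.2) (v := fun p => p.1)
      (l := PySem.List.enumerate (pvOrder ks) 0) (d := PySem.Dict.empty)
      (by intro a _; simp [PySem.Dict.contains_empty]) hkeysnd
  have hkeys : (pvRank ks).keys = pvOrder ks := by
    show (pvRank ks).items.map (·.1) = _
    rw [hitems]
    rw [List.map_append, List.map_map]
    have h4 := PySem.List.map_snd_enumerate (pvOrder ks) 0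
    show List.map (fun p : Int × Int => p.2) (PySem.List.enumerate (pvOrder ks) 0) = pvOrder ks
    exact h4
  have ht : (pvOrder ks).idxOf c < (pvOrder ks).length := List.idxOf_lt_length_of_mem hc
  have hmem : (c, ((pvOrder ks).idxOf c : Int)) ∈ (pvRank ks).items := by
    rw [hitems]
    have hlen : (pvOrder ks).idxOf c < (PySem.List.enumerate (pvOrder ks) 0).length := by
      rw [PySem.List.length_enumerate]; exact ht
    have heq : (PySem.List.enumerate (pvOrder ks) 0)[(pvOrder ks).idxOf c]'hlen = ((0:Int) + ((pvOrder ks).idxOf c : Int), (pvOrder ks)[(pvOrder ks).idxOf c]'ht) :=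
      PySem.List.getElem_enumerate _ _ _ _
    have hmem0 : (((0:Int) + ((pvOrder ks).idxOf c : Int), (pvOrder ks)[(pvOrder ks).idxOf c]'ht) : Int × Int) ∈ PySem.List.enumerate (pvOrder ks) 0 := by
      rw [← heq]; exact List.getElem_mem _
    simp only [List.mem_append, List.mem_map]
    right
    exact ⟨_, hmem0, by simp [List.getElem_idxOf]⟩
  exact PySem.Dict.getD_of_mem_items _ hmem (by rw [hkeys]; exact hnd) 0


def pvShape (m : List (List (List Char))) (R K : Nat) : Prop :=
  m.length = R ∧ ∀ row ∈ m, row.length = K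

theorem pvShape_set2 {m : List (List (List Char))} {R K : Nat} (hsh : pvShape m R K)
    (i j : Int) (v : List Char) (hi : 0 ≤ i) (hiR : i < (R:Int)) : pvShape (pvSet2 m i j v) R K := by
  obtain ⟨h1, h2⟩ := hsh
  refine ⟨by rw [pvSet2, PySem.List.length_pySetD, h1], ?_⟩
  intro row hrow
  rw [pvSet2, PySem.List.pySetD_of_nonneg _ _ hi] at hrow
  rcases List.mem_or_eq_of_mem_set hrow with h | h
  · exact h2 _ h
  · subst h
    rw [PySem.List.length_pySetD]
    exact h2 _ (PySem.List.pyGetD_mem _ _ (by constructor <;> omega))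

theorem pvCell_set2 {m : List (List (List Char))} {R K : Nat} (hsh : pvShape m R K)
    {i j i' j' : Int} (hi : 0 ≤ i) (hiR : i < (R:Int)) (hj : 0 ≤ j)
    (hi' : 0 ≤ i') (hi'R : i' < (R:Int)) (hj' : 0 ≤ j') (hj'K : j' < (K:Int)) (v : List Char) :
    pvCell (pvSet2 m i j v) i' j' = if i' = i ∧ j' = j then v else pvCell m i' j' := by
  obtain ⟨h1, h2⟩ := hsh
  have hrowmem : PySem.List.pyGetD m i [] ∈ m :=
    PySem.List.pyGetD_mem _ _ (by constructor <;> omega)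
  have hrowlen : (PySem.List.pyGetD m i []).length = K := h2 _ hrowmem
  have hrowmem' : PySem.List.pyGetD m i' [] ∈ m :=
    PySem.List.pyGetD_mem _ _ (by constructor <;> omega)
  have hrowlen' : (PySem.List.pyGetD m i' []).length = K := h2 _ hrowmem'
  have hset : pvSet2 m i j v = m.set i.toNat (PySem.List.pySetD (PySem.List.pyGetD m i []) j v) := by
    rw [pvSet2, PySem.List.pySetD_of_nonneg _ _ hi]
  rw [pvCell, pvCell, hset]
  rw [PySem.List.pyGetD_eq_getElem _ _ hi' (by simp only [List.length_set]; omega)]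
  rw [List.getElem_set]
  by_cases hii : i.toNat = i'.toNat
  · rw [if_pos hii]
    have hieq : i' = i := by omega
    subst hieq
    rw [PySem.List.pySetD_of_nonneg _ _ hj,
        PySem.List.pyGetD_eq_getElem _ _ hj' (by simp only [List.length_set]; omega),
        List.getElem_set,
        PySem.List.pyGetD_eq_getElem _ _ hj' (by omega)]
    split_ifs with hA hB hB
    · rfl
    · exfalso; exact hB ⟨rfl, by omega⟩
    · exfalso; omega
    · rfl
  · rw [if_neg hii]
    have : ¬ (i' = i ∧ j' = j) := fun ⟨h, _⟩ => hii (by omega)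
    rw [if_neg this, PySem.List.pyGetD_eq_getElem _ _ hi' (by omega)]

theorem pvInner_spec (cs : List Char) {R K : Nat} (c : Int) (hc0 : 0 ≤ c)
    (v : Int) (hvn : v ≤ (cs.length : Int)) {m} (hsh : pvShape m R K)
    (r : Nat) (hr : r ≤ R) :
    ((PySem.List.pyRange 0 (r:Int) 1).foldl (pvStep cs c) (m, v)).2 = min (v + r) (cs.length : Int) ∧
    pvShape ((PySem.List.pyRange 0 (r:Int) 1).foldl (pvStep cs c) (m, v)).1 R K ∧
    ∀ i j' : Int, 0 ≤ i → i < (R:Int) → 0 ≤ j' → j' < (K:Int) →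
      pvCell ((PySem.List.pyRange 0 (r:Int) 1).foldl (pvStep cs c) (m, v)).1 i j' =
        if j' = c ∧ i < (r:Int) ∧ v + i < (cs.length : Int) then [PySem.List.pyGetD cs (v + i) ' ']
        else pvCell m i j' := by
  induction r with
  | zero =>
    rw [PySem.List.pyRange_one_eq_nil (by omega), List.foldl_nil]
    refine ⟨by simp; omega, hsh, ?_⟩
    intro i j' h1 h2 h3 h4
    rw [if_neg (by omega)]
  | succ r ih =>
    obtain ⟨ih1, ih2, ih3⟩ := ih (by omega)
    have hcast : ((r+1 : Nat) : Int) = (r : Int) + 1 := by push_cast; ring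
    rw [hcast, PySem.List.pyRange_one_succ_right (by omega), List.foldl_append]
    set res := (PySem.List.pyRange 0 (r:Int) 1).foldl (pvStep cs c) (m, v) with hres
    rw [List.foldl_cons, List.foldl_nil]
    by_cases hlt : v + r < (cs.length : Int)
    · have hstep : pvStep cs c res (r:Int) =
          (pvSet2 res.1 (r:Int) c [PySem.List.pyGetD cs (v + r) ' '], v + r + 1) := by
        rw [pvStep, if_pos (by simp only [PySem.List.len_eq]; omega)]
        rw [ih1]
        have : min (v + (r:Int)) (cs.length : Int) = v + r := by omega
        rw [this]
      rw [hstep]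
      refine ⟨by simp; omega, pvShape_set2 ih2 _ _ _ (by omega) (by omega), ?_⟩
      intro i j' h1 h2 h3 h4
      rw [pvCell_set2 ih2 (by omega) (by omega) hc0 h1 h2 h3 h4]
      rw [ih3 i j' h1 h2 h3 h4]
      by_cases hij : i = (r:Int) ∧ j' = c
      · rw [if_pos ⟨hij.1, hij.2⟩, if_pos (by omega), hij.1]
      · rw [if_neg (by tauto)]
        by_cases hcond : j' = c ∧ i < (r:Int) ∧ v + i < (cs.length : Int)
        · rw [if_pos hcond, if_pos (by omega)]
        · rw [if_neg hcond, if_neg (by omega)]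
    · have hstep : pvStep cs c res (r:Int) = res := by
        rw [pvStep, if_neg (by simp only [PySem.List.len_eq]; omega)]
      rw [hstep]
      refine ⟨by omega, ih2, ?_⟩
      intro i j' h1 h2 h3 h4
      rw [ih3 i j' h1 h2 h3 h4]
      by_cases hcond : j' = c ∧ i < (r:Int) ∧ v + i < (cs.length : Int)
      · rw [if_pos hcond, if_pos (by omega)]
      · rw [if_neg hcond, if_neg (by omega)]

theorem pvMin_helper (a R n : Int) (hR : 0 ≤ R) :
    min (min a n + R) n = min (a + R) n := by omega

theorem pvFill_spec (cs : List Char) {R K : Nat} (L : List Int) (r0 : Int) (h0 : 0 ≤ r0)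
    (hnd : L.Nodup) (hL : ∀ c ∈ L, 0 ≤ c ∧ c < (K:Int)) {m} (hsh : pvShape m R K) :
    (L.foldl (fun st c => (PySem.List.pyRange 0 (R:Int) 1).foldl (pvStep cs c) st)
        (m, min (r0 * R) (cs.length : Int))).2 = min ((r0 + L.length) * R) (cs.length : Int) ∧
    pvShape (L.foldl (fun st c => (PySem.List.pyRange 0 (R:Int) 1).foldl (pvStep cs c) st)
        (m, min (r0 * R) (cs.length : Int))).1 R K ∧
    ∀ i j' : Int, 0 ≤ i → i < (R:Int) → 0 ≤ j' → j' < (K:Int) →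
      pvCell (L.foldl (fun st c => (PySem.List.pyRange 0 (R:Int) 1).foldl (pvStep cs c) st)
          (m, min (r0 * R) (cs.length : Int))).1 i j' =
        if j' ∈ L ∧ (r0 + L.idxOf j') * R + i < (cs.length : Int)
        then [PySem.List.pyGetD cs ((r0 + L.idxOf j') * R + i) ' ']
        else pvCell m i j' := by
  induction L generalizing r0 m with
  | nil =>
    rw [List.foldl_nil]
    refine ⟨by simp, hsh, ?_⟩
    intro i j' h1 h2 h3 h4
    rw [if_neg (by simp)]
  | cons c L' ih =>
    rw [List.foldl_cons]
    have hcL : 0 ≤ c ∧ c < (K:Int) := hL c List.mem_cons_self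
    have hvn : min (r0 * R) (cs.length : Int) ≤ (cs.length : Int) := min_le_right _ _
    obtain ⟨s1, s2, s3⟩ := pvInner_spec cs c hcL.1 _ hvn hsh R (le_refl R)
    set res1 := (PySem.List.pyRange 0 (R:Int) 1).foldl (pvStep cs c)
        (m, min (r0 * R) (cs.length : Int)) with hres1
    have hres1eq : res1 = (res1.1, min ((r0 + 1) * R) (cs.length : Int)) := by
      have : res1.2 = min ((r0 + 1) * R) (cs.length : Int) := by
        rw [s1, pvMin_helper _ _ _ (by positivity)]; ring_nf
      exact Prod.ext rfl this
    have h1R : min ((r0 + 1) * R) (cs.length : Int) = min ((r0 + 1) * R) (cs.length : Int) := rfl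
    rw [hres1eq]
    obtain ⟨t1, t2, t3⟩ := ih (r0 + 1) (by omega) hnd.of_cons
      (fun x hx => hL x (List.mem_cons_of_mem _ hx)) s2
    refine ⟨?_, ?_, ?_⟩
    · rw [t1]; congr 1; push_cast [List.length_cons]; ring
    · exact t2
    · intro i j' h1 h2 h3 h4
      rw [t3 i j' h1 h2 h3 h4, s3 i j' h1 h2 h3 h4]
      have hcnotin : c ∉ L' := (List.nodup_cons.mp hnd).1
      by_cases hjc : j' = c
      · rw [if_neg (fun hcon => hcnotin (hjc ▸ hcon.1))]
        have hidx0 : List.idxOf j' (c :: L') = 0 := by simp [hjc]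
        rw [hidx0]
        have hval : ((r0 + ((0:Nat):Int)) * (R:Int) + i) = r0 * (R:Int) + i := by push_cast; ring
        rw [hval]
        by_cases hle : r0 * (R:Int) ≤ (cs.length : Int)
        · have hminv : min (r0 * (R:Int)) (cs.length:Int) = r0 * (R:Int) := by omega
          rw [hminv]
          by_cases hcond : r0 * (R:Int) + i < (cs.length : Int)
          · rw [if_pos ⟨hjc, h2, hcond⟩, if_pos ⟨by simp [hjc], hcond⟩]
          · rw [if_neg (fun hcon => hcond hcon.2.2), if_neg (fun hcon => hcond hcon.2)]
        · have hminv : min (r0 * (R:Int)) (cs.length:Int) = (cs.length:Int) := by omega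
          rw [hminv]
          rw [if_neg (by omega), if_neg (by rintro ⟨-, hcon⟩; omega)]
      · have hne : (c == j') = false := beq_eq_false_iff_ne.mpr (fun h => hjc h.symm)
        have hidx2 : List.idxOf j' (c :: L') = List.idxOf j' L' + 1 := by
          simp [List.idxOf_cons, hne]
        have hval : ((r0 + ((List.idxOf j' L' + 1 : Nat)):Int) * (R:Int) + i) = (r0 + 1 + (List.idxOf j' L' : Int)) * (R:Int) + i := by push_cast; ring
        rw [hidx2, hval, if_neg (show ¬(j' = c ∧ i < (R:Int) ∧ min (r0 * (R:Int)) ((cs.length:Int)) + i < (cs.length:Int)) from fun hcon => hjc hcon.1)]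
        by_cases hmem : j' ∈ L' ∧ (r0 + 1 + (List.idxOf j' L' : Int)) * (R:Int) + i < (cs.length : Int)
        · rw [if_pos hmem, if_pos ⟨List.mem_cons_of_mem _ hmem.1, hmem.2⟩]
        · rw [if_neg hmem, if_neg (fun hcon => hmem ⟨(List.mem_cons.mp hcon.1).resolve_left hjc, hcon.2⟩)]

theorem pvRead_diag (cs : List Char) {K R : Nat} (M : List (List (List Char))) (g : Int → Int)
    (hcell : ∀ i j' : Int, 0 ≤ i → i < (R:Int) → 0 ≤ j' → j' < (K:Int) →
      pvCell M i j' = if g j' * R + i < (cs.length:Int) then [PySem.List.pyGetD cs (g j' * R + i) ' '] else [])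
    (d : Int) (hd0 : 0 ≤ d) (hdlt : d < (R:Int) + (K:Int) - 1) (acc : List Char) :
    (PySem.List.pyRange 0 (R:Int) 1).foldl (fun acc i =>
        if 0 ≤ d - i ∧ d - i < (K:Int) then acc ++ pvCell M i (d - i) else acc) acc
    = (PySem.List.pyRange (max 0 (d - K + 1)) (min ((R:Int) - 1) d + 1) 1).foldl (fun acc i =>
        if g (d - i) * R + i < (cs.length:Int) then acc ++ [PySem.List.pyGetD cs (g (d - i) * R + i) ' '] else acc) acc := by
  have hKpos : (0:Int) ≤ K := by positivity
  set lo : Int := max 0 (d - K + 1) with hlo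
  set hi1 : Int := min ((R:Int) - 1) d + 1 with hhi
  have hb1 : 0 ≤ lo := le_max_left _ _
  have hb2 : lo ≤ hi1 := by omega
  have hb3 : hi1 ≤ (R:Int) := by omega
  -- LHS to flatMap form
  rw [PySem.List.foldl_congr_mem _ _
      (fun acc i => acc ++ (if 0 ≤ d - i ∧ d - i < (K:Int) then pvCell M i (d - i) else [])) _
      (by intro a i _
          beta_reduce
          by_cases hc : 0 ≤ d - i ∧ d - i < (K:Int)
          · rw [if_pos hc, if_pos hc]
          · rw [if_neg hc, if_neg hc, List.append_nil])]
  rw [PySem.List.foldl_append_eq_flatMap]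
  -- RHS to flatMap form
  rw [PySem.List.foldl_congr_mem _ _
      (fun acc i => acc ++ (if g (d - i) * R + i < (cs.length:Int) then [PySem.List.pyGetD cs (g (d - i) * R + i) ' '] else [])) _
      (by intro a i _
          beta_reduce
          by_cases hc : g (d - i) * R + i < (cs.length:Int)
          · rw [if_pos hc, if_pos hc]
          · rw [if_neg hc, if_neg hc, List.append_nil])]
  rw [PySem.List.foldl_append_eq_flatMap]
  congr 1
  rw [PySem.List.pyRange_one_append 0 lo (R:Int) hb1 (by omega),
      PySem.List.pyRange_one_append lo hi1 (R:Int) hb2 hb3,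
      List.flatMap_append, List.flatMap_append]
  have hleft : (PySem.List.pyRange 0 lo 1).flatMap
      (fun i => if 0 ≤ d - i ∧ d - i < (K:Int) then pvCell M i (d - i) else []) = [] := by
    rw [List.flatMap_eq_nil_iff]
    intro i hi
    rw [PySem.List.mem_pyRange_one] at hi
    refine if_neg ?_
    rintro ⟨hc1, hc2⟩
    have : lo ≤ i := max_le hi.1 (by omega)
    omega
  have hright : (PySem.List.pyRange hi1 (R:Int) 1).flatMap
      (fun i => if 0 ≤ d - i ∧ d - i < (K:Int) then pvCell M i (d - i) else []) = [] := by
    rw [List.flatMap_eq_nil_iff]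
    intro i hi
    rw [PySem.List.mem_pyRange_one] at hi
    refine if_neg ?_
    rintro ⟨hc1, hc2⟩
    rcases min_choice ((R:Int) - 1) d with h | h <;> rw [hlo, hhi, h] at * <;> omega
  rw [hleft, hright, List.append_nil, List.nil_append]
  refine List.flatMap_congr ?_
  intro i hi
  rw [PySem.List.mem_pyRange_one] at hi
  have hi0 : 0 ≤ i := le_trans hb1 hi.1
  have hiR : i < (R:Int) := lt_of_lt_of_le hi.2 hb3
  have hcond : 0 ≤ d - i ∧ d - i < (K:Int) := by
    constructor
    · have : i ≤ d := by
        have := hi.2; rw [hhi] at this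
        have hmin := min_le_right ((R:Int) - 1) d
        omega
      omega
    · have : max 0 (d - (K:Int) + 1) ≤ i := hi.1
      have := le_max_right (0:Int) (d - (K:Int) + 1)
      omega
  rw [if_pos hcond, hcell i (d - i) hi0 hiR hcond.1 hcond.2]

theorem pvGetD_all_nil {α : Type} (xs : List (List α)) (h : ∀ r ∈ xs, r = []) (i : Int) :
    PySem.List.pyGetD xs i [] = [] := by
  by_cases hin : PySem.Raise.InRange xs.length i
  · exact h _ (PySem.List.pyGetD_mem _ _ hin)
  · exact PySem.List.pyGetD_of_none _ _ _ ((PySem.List.pyGet?_eq_none_iff _ _).mpr hin)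

theorem pvMatrix0_shape (R K : Nat) : pvShape (pvMatrix0 (R:Int) (K:Int)) R K := by
  rw [pvMatrix0]
  constructor
  · rw [List.length_map, PySem.List.length_pyRange_one]; omega
  · intro row hrow
    rcases List.mem_map.mp hrow with ⟨_, _, rfl⟩
    rw [List.length_map, PySem.List.length_pyRange_one]; omega

theorem pvCell_matrix0 (R K : Nat) (i j : Int) :
    pvCell (pvMatrix0 (R:Int) (K:Int)) i j = [] := by
  rw [pvMatrix0, pvCell]
  by_cases hin : PySem.Raise.InRange ((PySem.List.pyRange 0 (R:Int) 1).map
      (fun _ => (PySem.List.pyRange 0 (K:Int) 1).map (fun _ => ([]:List Char)))).length i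
  · have hmem := PySem.List.pyGetD_mem ((PySem.List.pyRange 0 (R:Int) 1).map
      (fun _ => (PySem.List.pyRange 0 (K:Int) 1).map (fun _ => ([]:List Char)))) ([] : List (List Char)) hin
    rcases List.mem_map.mp hmem with ⟨_, _, heq⟩
    rw [← heq]
    apply pvGetD_all_nil
    intro r hr
    rcases List.mem_map.mp hr with ⟨_, _, rfl⟩
    rfl
  · rw [PySem.List.pyGetD_of_none _ _ _ ((PySem.List.pyGet?_eq_none_iff _ _).mpr hin)]
    apply pvGetD_all_nil
    intro r hr
    exact absurd hr (List.not_mem_nil)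

theorem pvRows_A (n K : Nat) :
    (if PySem.Int.mod (n:Int) (K:Int) ≠ 0 then PySem.Int.floordiv (n:Int) (K:Int) + 1 else PySem.Int.floordiv (n:Int) (K:Int))
      = ((n / K + (if n % K ≠ 0 then 1 else 0) : Nat) : Int) := by
  simp only [PySem.Int.floordiv_natCast, PySem.Int.mod_natCast]
  split_ifs with h1 h2 <;> push_cast <;> omega

theorem pvRows_B (n K : Nat) :
    PySem.Int.floordiv (n:Int) (K:Int) + (if PySem.Int.mod (n:Int) (K:Int) ≠ 0 then (1:Int) else 0)
      = ((n / K + (if n % K ≠ 0 then 1 else 0) : Nat) : Int) := by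
  simp only [PySem.Int.floordiv_natCast, PySem.Int.mod_natCast]
  split_ifs with h1 h2 <;> push_cast <;> omega

theorem pvFoldl_pairs {γ : Type} (S : List (Char × Int)) (F : γ → Int → γ) (init : γ) :
    S.foldl (fun st p => F st p.2) init = (S.map (fun p => p.2)).foldl F init :=
  (List.foldl_map).symm

theorem diagonal_decrypt_equiv (e key : String) (h : key.toList ≠ []) :
    diagonal_decrypt e key = diagonal_decrypt_alt e key := by
  have hK : 0 < key.toList.length := List.length_pos_iff.mpr h
  simp only [diagonal_decrypt, diagonal_decrypt_alt]
  generalize hnl : PySem.List.len e.toList = nI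
  generalize hkl : PySem.List.len key.toList = kI
  rw [show nI = (e.toList.length : Int) from by rw [← hnl]; exact PySem.List.len_eq _,
      show kI = (key.toList.length : Int) from by rw [← hkl]; exact PySem.List.len_eq _]
  set cs := e.toList with hcs
  set ks := key.toList with hks
  simp only [pvRows_A cs.length ks.length, pvRows_B cs.length ks.length]
  set R : Nat := cs.length / ks.length + (if cs.length % ks.length ≠ 0 then 1 else 0) with hR
  rw [pvFoldl_pairs (pvSortedPairs ks)
      (fun st c => (PySem.List.pyRange 0 ((R:Nat):Int) 1).foldl (pvStep cs c) st)]
  rw [show (pvSortedPairs ks).map (fun p => p.2) = pvOrder ks from rfl]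
  rw [show ((PySem.List.enumerate (pvOrder ks) 0).foldl (fun d p => d.insert p.2 p.1) PySem.Dict.empty) = pvRank ks from rfl]
  congr 2
  conv_lhs => rw [show (pvMatrix0 (R:Int) (ks.length:Int), (0:Int))
      = (pvMatrix0 (R:Int) (ks.length:Int), min ((0:Int) * (R:Int)) ((cs.length:Int))) from by
    simp]
  obtain ⟨-, -, hcells⟩ := pvFill_spec cs (pvOrder ks) 0 le_rfl (pvOrder_nodup ks)
      (fun c hc => (pvOrder_mem ks c).mp hc) (pvMatrix0_shape R ks.length)
  have hcell : ∀ i j' : Int, 0 ≤ i → i < (R:Int) → 0 ≤ j' → j' < (ks.length:Int) →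
      pvCell ((pvOrder ks).foldl (fun st c => (PySem.List.pyRange 0 ((R:Nat):Int) 1).foldl (pvStep cs c) st)
          (pvMatrix0 (R:Int) (ks.length:Int), min ((0:Int) * (R:Int)) ((cs.length:Int)))).1 i j'
        = if ((List.idxOf j' (pvOrder ks) : Int)) * (R:Int) + i < (cs.length:Int)
          then [PySem.List.pyGetD cs (((List.idxOf j' (pvOrder ks) : Int)) * (R:Int) + i) ' '] else [] := by
    intro i j' h1 h2 h3 h4
    rw [hcells i j' h1 h2 h3 h4, pvCell_matrix0]
    have hmem : j' ∈ pvOrder ks := (pvOrder_mem ks j').mpr ⟨h3, h4⟩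
    have harith : ((0:Int) + (List.idxOf j' (pvOrder ks) : Int)) * (R:Int) + i
        = (List.idxOf j' (pvOrder ks) : Int) * (R:Int) + i := by ring
    rw [harith]
    simp only [hmem, true_and]
  rw [show ((ks.length:Int) + (R:Int) - 1) = ((R:Int) + (ks.length:Int) - 1) from by ring]
  apply PySem.List.foldl_congr_mem
  intro acc d hd
  rw [PySem.List.mem_pyRange_one] at hd
  rw [pvRead_diag cs _ (fun j => (List.idxOf j (pvOrder ks) : Int)) hcell d hd.1 (by omega)]
  apply PySem.List.foldl_congr_mem
  intro a i hi
  rw [PySem.List.mem_pyRange_one] at hi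
  have hji : 0 ≤ d - i ∧ d - i < (ks.length:Int) := by
    constructor
    · have h1 := hi.2
      have h2 := min_le_right ((R:Int) - 1) d
      omega
    · have h1 := hi.1
      have h2 := le_max_right (0:Int) (d - (ks.length:Int) + 1)
      omega
  have hrg : (pvRank ks).getD (d - i) 0 = ((List.idxOf (d - i) (pvOrder ks)):Int) :=
    pvRank_getD ks (d - i) ((pvOrder_mem ks _).mpr hji)
  rw [hrg]

-- ===== VERDICT (by name: the statement is the Claim_ definition above) =====
theorem diagonal_decrypt_spec : Claim_equal_diagonal_decrypt := by
  intro e k _ hpre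
  unfold Spec_diagonal_decrypt
  exact diagonal_decrypt_equiv e k hpre
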